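-- pv_equiv track=rewrite | github.com/stenknutsen/HomeGrownPOSTagger | PhaseFourTagging.py | IN_UNK_PUNC_so_Tagger
-- ===== SOURCE A (Python) =====
-- def IN_UNK_PUNC_so_Tagger(sent):
--     sentToReturn = []
--     skip = 0
--
--     for i in range(len(sent)):
--
--         if skip>0:
--             skip = skip -1
--             continue
--
--
--         if (i)<0 | (i+3)>=len(sent):
--             sentToReturn += [sent[i]]
--             continue
--
--         leftContext = sent[i]
--         leftTarget = sent[i+1]
--         rightTarget = sent[i+2]
--         rightContext = sent[i+3]
--
--
--         if (leftContext[1]=="IN")&(leftTarget[1]=="UNK")&(rightTarget[0]==",")&(rightContext[0].lower()=="so"):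
--
--             sentToReturn += [leftContext]
--             sentToReturn += [(leftTarget[0], "N")]
--             sentToReturn += [rightTarget]
--             sentToReturn += [rightContext]
--             skip = 3
--
--         else:
--             sentToReturn += [leftContext]
--
--     return sentToReturn
-- ===== SOURCE B (Python) =====
-- def IN_UNK_PUNC_so_Tagger(sent):
--     # Pass 1: greedy left-to-right scan collecting the positions of UNK tokens
--     # that sit inside an IN/UNK/,/so window (non-overlapping, like A's skip).
--     n = len(sent)
--     retag = []
--     i = 0
--     while i + 3 < n:
--         if (sent[i][1] == "IN" and sent[i+1][1] == "UNK"
--                 and sent[i+2][0] == "," and sent[i+3][0].lower() == "so"):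
--             retag.append(i + 1)
--             i += 4
--         else:
--             i += 1
--     # Pass 2: the output is just sent with those positions retagged to "N"
--     # (A never drops or reorders tokens, only rewrites the matched UNK tag).
--     out = []
--     for j in range(n):
--         out.append((sent[j][0], "N") if j in retag else sent[j])
--     return out
-- ===== Notes on version B (the rewrite author's own statement) =====
-- stated objective: alternative
-- what changed: Two staged passes instead of A's interleaved scan-and-emit with a skip counter: pass 1 collects the positions of the UNK tokens inside matched IN/UNK/,/so windows, pass 2 rebuilds the sentence as a positional map that retags exactly those positions, exploiting that the output is always the input with only tags changed.
import Mathlib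
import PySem

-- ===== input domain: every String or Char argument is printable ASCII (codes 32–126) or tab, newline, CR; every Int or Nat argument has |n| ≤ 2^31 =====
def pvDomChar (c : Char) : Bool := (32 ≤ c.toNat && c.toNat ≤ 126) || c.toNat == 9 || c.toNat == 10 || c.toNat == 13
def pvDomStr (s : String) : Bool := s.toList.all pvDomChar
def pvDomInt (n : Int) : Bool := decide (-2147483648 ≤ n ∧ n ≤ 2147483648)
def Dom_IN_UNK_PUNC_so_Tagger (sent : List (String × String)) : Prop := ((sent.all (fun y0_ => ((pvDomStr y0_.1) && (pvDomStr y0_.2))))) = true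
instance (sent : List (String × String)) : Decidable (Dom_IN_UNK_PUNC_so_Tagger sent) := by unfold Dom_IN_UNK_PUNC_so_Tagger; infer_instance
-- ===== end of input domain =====

-- B replaces A's interleaved scan-and-emit loop with a skip counter by two staged
-- passes: collect the retag positions first, then rebuild the sentence positionally.


-- The four-token window test, identical in both Pythons (indices in range: getD).
def pvCond (sent : List (String × String)) (i : Nat) : Bool :=
  ((sent.getD i ("", "")).2 == "IN") && ((sent.getD (i+1) ("", "")).2 == "UNK")
    && ((sent.getD (i+2) ("", "")).1 == ",") && (PySem.Str.lower (sent.getD (i+3) ("", "")).1 == "so")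

-- ===== PORT A =====
-- A's for-loop over range(len(sent)) with the skip counter and the running
-- accumulator.  The Python guard '(i)<0 | (i+3)>=len(sent)' chains as
-- 'i < (0 | (i+3)) and (0 | (i+3)) >= len(sent)' and is transcribed literally.
def pvGoA (sent : List (String × String)) : Nat → Nat → List (String × String) → List (String × String)
  | i, skip, acc =>
    if i < sent.length then
      if skip > 0 then pvGoA sent (i+1) (skip-1) acc
      else if ((i:Int) < Int.lor 0 ((i:Int)+3) ∧ Int.lor 0 ((i:Int)+3) ≥ (sent.length:Int)) then
        pvGoA sent (i+1) 0 (acc ++ [sent.getD i ("", "")])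
      else
        let leftContext := sent.getD i ("", "")
        let leftTarget := sent.getD (i+1) ("", "")
        let rightTarget := sent.getD (i+2) ("", "")
        let rightContext := sent.getD (i+3) ("", "")
        if pvCond sent i then
          pvGoA sent (i+1) 3 (acc ++ [leftContext] ++ [(leftTarget.1, "N")] ++ [rightTarget] ++ [rightContext])
        else
          pvGoA sent (i+1) 0 (acc ++ [leftContext])
    else acc
termination_by i _ _ => sent.length - i

def IN_UNK_PUNC_so_Tagger (sent : List (String × String)) : List (String × String) :=
  pvGoA sent 0 0 []

-- ===== PORT B =====
-- B pass 1: the while loop collecting retag positions (i+1 of each matched window).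
def pvScan (sent : List (String × String)) : Nat → List Nat
  | i =>
    if i + 3 < sent.length then
      if pvCond sent i then (i+1) :: pvScan sent (i+4)
      else pvScan sent (i+1)
    else []
termination_by i => sent.length - i

-- B pass 2: the for-loop over range(n) appending the (re)tagged token at each j.
def pvBuild (sent : List (String × String)) (retag : List Nat) : Nat → List (String × String) → List (String × String)
  | j, out =>
    if j < sent.length then
      pvBuild sent retag (j+1)
        (out ++ [if retag.contains j then ((sent.getD j ("", "")).1, "N") else sent.getD j ("", "")])
    else out
termination_by j _ => sent.length - j

def IN_UNK_PUNC_so_Tagger_alt (sent : List (String × String)) : List (String × String) :=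
  pvBuild sent (pvScan sent 0) 0 []

-- ===== PRECONDITION & SPEC =====
def Spec_IN_UNK_PUNC_so_Tagger (sent : List (String × String)) (out : List (String × String)) : Prop := out = IN_UNK_PUNC_so_Tagger_alt sent
instance (sent : List (String × String)) (out : List (String × String)) : Decidable (Spec_IN_UNK_PUNC_so_Tagger sent out) := by unfold Spec_IN_UNK_PUNC_so_Tagger; infer_instance

-- ===== CLAIM (what is proved, stated in full; the proofs are below) =====
def Claim_equal_IN_UNK_PUNC_so_Tagger : Prop := ∀ (sent : List (String × String)), Dom_IN_UNK_PUNC_so_Tagger sent → Spec_IN_UNK_PUNC_so_Tagger sent (IN_UNK_PUNC_so_Tagger sent)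

-- ===== LEMMAS AND PROOFS =====

-- Middle form: the common output, written cons-wise without accumulators.
def pvMid (sent : List (String × String)) : Nat → List (String × String)
  | i =>
    if i < sent.length then
      if i + 3 < sent.length ∧ pvCond sent i then
        sent.getD i ("", "") :: ((sent.getD (i+1) ("", "")).1, "N")
          :: sent.getD (i+2) ("", "") :: sent.getD (i+3) ("", "") :: pvMid sent (i+4)
      else sent.getD i ("", "") :: pvMid sent (i+1)
    else []
termination_by i => sent.length - i

-- Cons form of pass 2.
def pvBuildC (sent : List (String × String)) (retag : List Nat) : Nat → List (String × String)
  | j =>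
    if j < sent.length then
      (if retag.contains j then ((sent.getD j ("", "")).1, "N") else sent.getD j ("", ""))
        :: pvBuildC sent retag (j+1)
    else []
termination_by j => sent.length - j

theorem pvGoA_stop (sent : List (String × String)) (i skip : Nat) (acc : List (String × String))
    (h : sent.length ≤ i) : pvGoA sent i skip acc = acc := by
  rw [pvGoA]; simp [Nat.not_lt.mpr h]

theorem pvLor (k : Nat) : Int.lor 0 ((k:Int)+3) = (k:Int)+3 := by
  have h : ((k:Int)+3) = Int.ofNat (k+3) := by rw [Int.ofNat_eq_natCast]; push_cast; ring
  rw [h]; simp [Int.lor]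

-- Stepping through s pending skips is the same as jumping the index by s.
theorem pvGoA_skip (sent : List (String × String)) :
    ∀ (s i : Nat) (acc : List (String × String)),
      pvGoA sent i s acc = pvGoA sent (i + s) 0 acc := by
  intro s
  induction s with
  | zero => intro i acc; rfl
  | succ s ih =>
    intro i acc
    conv_lhs => rw [pvGoA]
    by_cases h : i < sent.length
    · rw [if_pos h, if_pos (Nat.succ_pos s)]
      have hs : s + 1 - 1 = s := rfl
      rw [hs, ih (i+1) acc]
      congr 1; omega
    · rw [if_neg h, pvGoA_stop sent (i + (s+1)) 0 acc (by omega)]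

-- A equals the middle form.
theorem pvGoA_eq_pvMid (sent : List (String × String)) :
    ∀ (i : Nat) (acc : List (String × String)), pvGoA sent i 0 acc = acc ++ pvMid sent i := by
  intro i
  induction hn : sent.length - i using Nat.strong_induction_on generalizing i with
  | _ n ih =>
    intro acc
    rw [pvGoA, pvMid]
    by_cases h : i < sent.length
    · rw [if_pos h, if_pos h, if_neg (by omega : ¬ (0:Nat) > 0)]
      by_cases hb : i + 3 < sent.length
      · have hg : ¬ ((i:Int) < Int.lor 0 ((i:Int)+3) ∧ Int.lor 0 ((i:Int)+3) ≥ (sent.length:Int)) := by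
          rw [pvLor]; omega
        rw [if_neg hg]
        by_cases hc : pvCond sent i
        · rw [if_pos hc, if_pos ⟨hb, hc⟩, pvGoA_skip]
          have h4 : i + 1 + 3 = i + 4 := by omega
          rw [h4, ih (sent.length - (i+4)) (by omega) (i+4) rfl]
          simp
        · rw [if_neg hc, if_neg (by simp [hc]), ih (sent.length - (i+1)) (by omega) (i+1) rfl]
          simp
      · have hg : ((i:Int) < Int.lor 0 ((i:Int)+3) ∧ Int.lor 0 ((i:Int)+3) ≥ (sent.length:Int)) := by
          rw [pvLor]; omega
        rw [if_pos hg, if_neg (by omega : ¬ (i + 3 < sent.length ∧ pvCond sent i)),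
          ih (sent.length - (i+1)) (by omega) (i+1) rfl]
        simp
    · rw [if_neg h, if_neg h]; simp

-- pass 2 accumulator form equals its cons form.
theorem pvBuild_eq_pvBuildC (sent : List (String × String)) (retag : List Nat) :
    ∀ (j : Nat) (out : List (String × String)),
      pvBuild sent retag j out = out ++ pvBuildC sent retag j := by
  intro j
  induction hn : sent.length - j using Nat.strong_induction_on generalizing j with
  | _ n ih =>
    intro out
    rw [pvBuild, pvBuildC]
    by_cases h : j < sent.length
    · rw [if_pos h, if_pos h, ih (sent.length - (j+1)) (by omega) (j+1) rfl]
      simp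
    · rw [if_neg h, if_neg h]; simp

-- Every collected position is strictly beyond the scan start.
theorem pvScan_gt (sent : List (String × String)) :
    ∀ (i j : Nat), j ∈ pvScan sent i → i < j := by
  intro i
  induction hn : sent.length - i using Nat.strong_induction_on generalizing i with
  | _ n ih =>
    intro j hj
    rw [pvScan] at hj
    by_cases h : i + 3 < sent.length
    · rw [if_pos h] at hj
      by_cases hc : pvCond sent i
      · rw [if_pos hc] at hj
        rcases List.mem_cons.mp hj with h1 | h1
        · omega
        · have := ih (sent.length - (i+4)) (by omega) (i+4) rfl j h1; omega
      · rw [if_neg hc] at hj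
        have := ih (sent.length - (i+1)) (by omega) (i+1) rfl j hj
        omega
    · rw [if_neg h] at hj; simp at hj

-- A position below the build index never fires: it can be dropped from retag.
theorem pvBuildC_cons_lt (sent : List (String × String)) (m : Nat) (R : List Nat) :
    ∀ (j : Nat), m < j → pvBuildC sent (m :: R) j = pvBuildC sent R j := by
  intro j
  induction hn : sent.length - j using Nat.strong_induction_on generalizing j with
  | _ n ih =>
    intro hm
    conv_lhs => rw [pvBuildC]
    conv_rhs => rw [pvBuildC]
    by_cases h : j < sent.length
    · rw [if_pos h, if_pos h, ih (sent.length - (j+1)) (by omega) (j+1) rfl (by omega)]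
      have : (m :: R).contains j = R.contains j := by
        simp
        intro h; omega
      rw [this]
    · rw [if_neg h, if_neg h]

theorem pvContains_of_scan_false (sent : List (String × String)) (i j : Nat)
    (h : j ≤ i) : (pvScan sent i).contains j = false := by
  by_contra hc
  have : j ∈ pvScan sent i := by
    simpa using Bool.of_not_eq_false hc
  have := pvScan_gt sent i j this
  omega

-- B's positional rebuild from the scan equals the middle form.
theorem pvBuildC_scan_eq_pvMid (sent : List (String × String)) :
    ∀ (i : Nat), pvBuildC sent (pvScan sent i) i = pvMid sent i := by
  intro i
  induction hn : sent.length - i using Nat.strong_induction_on generalizing i with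
  | _ n ih =>
    rw [pvMid, pvScan]
    by_cases h : i < sent.length
    · rw [if_pos h]
      by_cases hb : i + 3 < sent.length
      · rw [if_pos hb]
        by_cases hc : pvCond sent i
        · rw [if_pos hc, if_pos ⟨hb, hc⟩]
          set R := pvScan sent (i+4) with hR
          have hRgt : ∀ j ∈ R, i + 4 < j := fun j hj => pvScan_gt sent (i+4) j hj
          rw [pvBuildC, if_pos h]
          have hnm : ∀ j, j ≤ i + 4 → j ≠ i + 1 → ((i+1) :: R).contains j = false := by
            intro j hj hne
            have : j ∉ (i+1) :: R := by
              intro hmem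
              rcases List.mem_cons.mp hmem with h1 | h1
              · exact hne h1
              · exact absurd (hRgt j h1) (by omega)
            simpa using this
          have c0 : ((i+1) :: R).contains i = false := hnm i (by omega) (by omega)
          rw [c0]
          rw [pvBuildC, if_pos (by omega : i + 1 < sent.length)]
          have c1 : ((i+1) :: R).contains (i+1) = true := by simp
          rw [c1]
          rw [pvBuildC, if_pos (by omega : i + 2 < sent.length)]
          have c2 : ((i+1) :: R).contains (i+2) = false := hnm (i+2) (by omega) (by omega)
          rw [c2]
          rw [pvBuildC, if_pos hb]
          have c3 : ((i+1) :: R).contains (i+3) = false := hnm (i+3) (by omega) (by omega)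
          rw [c3]
          rw [pvBuildC_cons_lt sent (i+1) R (i+4) (by omega)]
          rw [ih (sent.length - (i+4)) (by omega) (i+4) rfl]
          simp
        · rw [if_neg hc, if_neg (by simp [hc])]
          conv_lhs => rw [pvBuildC]
          rw [if_pos h, pvContains_of_scan_false sent (i+1) i (by omega)]
          simp [ih (sent.length - (i+1)) (by omega) (i+1) rfl]
      · rw [if_neg hb, if_neg (by omega : ¬ (i + 3 < sent.length ∧ pvCond sent i))]
        conv_lhs => rw [pvBuildC]
        rw [if_pos h]
        have hscan1 : pvScan sent (i+1) = [] := by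
          rw [pvScan, if_neg (by omega : ¬ i + 1 + 3 < sent.length)]
        have htail : pvBuildC sent ([] : List Nat) (i+1) = pvMid sent (i+1) := by
          rw [← hscan1]; exact ih (sent.length - (i+1)) (by omega) (i+1) rfl
        simp [htail]
    · rw [if_neg h, if_neg (by omega : ¬ i + 3 < sent.length), pvBuildC, if_neg h]

-- ===== VERDICT (by name: the statement is the Claim_ definition above) =====
theorem IN_UNK_PUNC_so_Tagger_spec : Claim_equal_IN_UNK_PUNC_so_Tagger := by
  intro sent _
  unfold Spec_IN_UNK_PUNC_so_Tagger IN_UNK_PUNC_so_Tagger IN_UNK_PUNC_so_Tagger_alt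
  rw [pvGoA_eq_pvMid, pvBuild_eq_pvBuildC, List.nil_append, List.nil_append,
    pvBuildC_scan_eq_pvMid]
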